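-- pv_equiv track=rewrite | github.com/RedTeamRaccoon/ElasticRule-Planner | ElasticRule-Planner/modules/batch_planner.py | identify_dependencies
-- ===== SOURCE A (Python) =====
-- from collections import defaultdict
--
-- def identify_dependencies(rules):
--     """
--     Identify rules that are related or dependent on each other.
--     Returns a dictionary mapping rule IDs to lists of related rule IDs.
--     """
--     dependencies = defaultdict(list)
--
--     # Group rules by tactic
--     tactic_groups = defaultdict(list)
--     for rule in rules:
--         tactics = rule.get('mitre_tactics', '').split(', ')
--         for tactic in tactics:
--             if tactic:
--                 tactic_groups[tactic].append(rule)
--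
--     # Group rules by technique
--     technique_groups = defaultdict(list)
--     for rule in rules:
--         # Extract just the technique IDs (e.g., "T1078" from "T1078 - Valid Accounts")
--         techniques_full = rule.get('mitre_techniques', '').split(', ')
--         techniques = [t.split(' - ')[0].strip() for t in techniques_full if t]
--         for technique in techniques:
--             if technique:
--                 technique_groups[technique].append(rule)
--
--     # Rules with the same technique are considered related
--     for rule in rules:
--         rule_id = rule.get('rule_rule_id', '')
--         if not rule_id:
--             continue
--
--         # Find related rules by technique
--         techniques_full = rule.get('mitre_techniques', '').split(', ')
--         techniques = [t.split(' - ')[0].strip() for t in techniques_full if t]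
--         for technique in techniques:
--             if technique:
--                 for related_rule in technique_groups[technique]:
--                     related_id = related_rule.get('rule_rule_id', '')
--                     if related_id and related_id != rule_id and related_id not in dependencies[rule_id]:
--                         dependencies[rule_id].append(related_id)
--
--     return dependencies
-- ===== SOURCE B (Python) =====
-- from collections import defaultdict
--
-- def identify_dependencies(rules):
--     """
--     Identify rules that are related or dependent on each other.
--     Returns a dictionary mapping rule IDs to lists of related rule IDs.
--     """
--     dependencies = defaultdict(list)
--     for rule in rules:
--         rule_id = rule.get('rule_rule_id', '')
--         if not rule_id:
--             continue
--         for part in rule.get('mitre_techniques', '').split(', '):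
--             tech = part.split(' - ')[0].strip()
--             if not tech:
--                 continue
--             for other in rules:
--                 if tech not in [p.split(' - ')[0].strip()
--                                 for p in other.get('mitre_techniques', '').split(', ')]:
--                     continue
--                 other_id = other.get('rule_rule_id', '')
--                 if other_id and other_id != rule_id and other_id not in dependencies[rule_id]:
--                     dependencies[rule_id].append(other_id)
--     return dependencies
-- ===== Notes on version B (the rewrite author's own statement) =====
-- stated objective: simpler
-- what changed: Removed A's dead tactic-grouping pass and its pre-built technique_groups index; B scans the rule list directly for each technique of each rule, parsing technique ids on the fly, and appends into a defaultdict with the same dedup test.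
import Mathlib
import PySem

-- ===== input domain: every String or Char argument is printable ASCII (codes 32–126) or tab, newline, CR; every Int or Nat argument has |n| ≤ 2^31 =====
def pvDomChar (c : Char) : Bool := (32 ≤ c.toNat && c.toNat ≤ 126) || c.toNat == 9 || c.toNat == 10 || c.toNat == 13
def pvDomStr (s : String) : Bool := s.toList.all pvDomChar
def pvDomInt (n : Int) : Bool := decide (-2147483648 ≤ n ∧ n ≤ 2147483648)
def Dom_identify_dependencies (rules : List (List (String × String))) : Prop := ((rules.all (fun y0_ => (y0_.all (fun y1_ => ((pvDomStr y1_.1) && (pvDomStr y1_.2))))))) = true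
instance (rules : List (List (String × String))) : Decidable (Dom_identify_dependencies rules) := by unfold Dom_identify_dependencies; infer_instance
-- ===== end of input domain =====

-- B drops A's dead tactic-grouping pass and its technique_groups index, scanning the rule
-- list directly per technique instead (objective: simpler — same result, no pre-built index).

-- ===== PORT A =====
-- shared helpers (identical code lines in Source A and Source B): dict.get(k,''), s.split(sep),
-- t.split(' - ')[0].strip()
def pvSplit (s sep : String) : List String := (PySem.Str.split? s sep).getD []
def pvGet (r : List (String × String)) (k : String) : String := (PySem.Dict.ofList r).getD k ""
def pvParseTech (t : String) : String := PySem.Str.strip ((pvSplit t " - ").headD "")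
-- [t.split(' - ')[0].strip() for t in full if t]
def pvTechsA (r : List (String × String)) : List String :=
  ((pvSplit (pvGet r "mitre_techniques") ", ").filter (fun t => t ≠ "")).map pvParseTech
-- the append step both Pythons share: if related_id and related_id != rule_id and
-- related_id not in dependencies[rule_id]: dependencies[rule_id].append(related_id)
def pvStep (rid : String) (deps : PySem.Dict String (List String))
    (rel : List (String × String)) : PySem.Dict String (List String) :=
  let relid := pvGet rel "rule_rule_id"
  if relid ≠ "" ∧ relid ≠ rid ∧ relid ∉ deps.getD rid [] then
    deps.insert rid (deps.getD rid [] ++ [relid])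
  else deps
-- technique_groups[technique].append(rule) pass of A
def pvGroupStep (g : PySem.Dict String (List (List (String × String))))
    (rule : List (String × String)) : PySem.Dict String (List (List (String × String))) :=
  (pvTechsA rule).foldl
    (fun g tech => if tech ≠ "" then g.insert tech (g.getD tech [] ++ [rule]) else g) g
def pvGroups (rules : List (List (String × String))) :
    PySem.Dict String (List (List (String × String))) :=
  rules.foldl pvGroupStep PySem.Dict.empty

-- dead tactic_groups pass of A (computed, never read)
def pvTacticGroups (rules : List (List (String × String))) :
    PySem.Dict String (List (List (String × String))) :=
  rules.foldl (fun g rule =>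
    (pvSplit (pvGet rule "mitre_tactics") ", ").foldl
      (fun g tactic => if tactic ≠ "" then g.insert tactic (g.getD tactic [] ++ [rule]) else g)
      g) PySem.Dict.empty

def identify_dependencies (rules : List (List (String × String))) : List (String × List String) :=
  let _tactic_groups := pvTacticGroups rules
  let technique_groups := pvGroups rules
  (rules.foldl (fun deps rule =>
      let rid := pvGet rule "rule_rule_id"
      if rid = "" then deps
      else (pvTechsA rule).foldl (fun deps tech =>
        if tech ≠ "" then (technique_groups.getD tech []).foldl (pvStep rid) deps
        else deps) deps)
    PySem.Dict.empty).items

-- ===== PORT B =====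
-- [p.split(' - ')[0].strip() for p in other.get('mitre_techniques','').split(', ')]
def pvTechsB (r : List (String × String)) : List String :=
  (pvSplit (pvGet r "mitre_techniques") ", ").map pvParseTech

def identify_dependencies_alt (rules : List (List (String × String))) : List (String × List String) :=
  (rules.foldl (fun deps rule =>
      let rid := pvGet rule "rule_rule_id"
      if rid = "" then deps
      else (pvSplit (pvGet rule "mitre_techniques") ", ").foldl (fun deps part =>
        let tech := pvParseTech part
        if tech = "" then deps
        else rules.foldl (fun deps other =>
          if tech ∉ pvTechsB other then deps
          else pvStep rid deps other) deps) deps)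
    PySem.Dict.empty).items

-- ===== PRECONDITION & SPEC =====
def Spec_identify_dependencies (rules : List (List (String × String))) (out : List (String × List String)) : Prop := out = identify_dependencies_alt rules
instance (rules : List (List (String × String))) (out : List (String × List String)) : Decidable (Spec_identify_dependencies rules out) := by unfold Spec_identify_dependencies; infer_instance

-- ===== CLAIM (what is proved, stated in full; the proofs are below) =====
def Claim_equal_identify_dependencies : Prop := ∀ (rules : List (List (String × String))), Dom_identify_dependencies rules → Spec_identify_dependencies rules (identify_dependencies rules)

-- ===== LEMMAS AND PROOFS =====

lemma foldl_ext {a s : Type} (f g : s → a → s) (l : List a)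
    (h : ∀ d x, x ∈ l → f d x = g d x) (d : s) : l.foldl f d = l.foldl g d := by
  induction l generalizing d with
  | nil => rfl
  | cons x l ih => rw [List.foldl_cons, List.foldl_cons, h d x (by simp),
      ih (fun d y hy => h d y (by simp [hy]))]

-- the group index, read at a nonempty technique id t, holds each rule once per
-- occurrence of t in its parsed technique list, in input order
lemma getD_pvGroupStep (t : String) (ht : t ≠ "")
    (g : PySem.Dict String (List (List (String × String)))) (Y : List (String × String)) :
    (pvGroupStep g Y).getD t []
      = g.getD t [] ++ List.replicate ((pvTechsA Y).count t) Y := by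
  unfold pvGroupStep
  induction pvTechsA Y generalizing g with
  | nil => simp
  | cons u ts ih =>
    rw [List.foldl_cons, List.count_cons]
    by_cases hu : u = t
    · subst hu
      rw [if_pos (by simpa using ht), ih, PySem.Dict.getD_insert_self]
      simp [List.replicate_succ, List.append_assoc]
    · have h1 : List.replicate (ts.count t + if u == t then 1 else 0) Y
          = List.replicate (ts.count t) Y := by
        simp [hu]
      rw [h1]
      by_cases hu0 : u = ""
      · rw [if_neg (by simp [hu0]), ih]
      · rw [if_pos (by simpa using hu0), ih, PySem.Dict.getD_insert,
          if_neg (Ne.symm hu)]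

lemma getD_pvGroups (rules : List (List (String × String))) (t : String) (ht : t ≠ "") :
    (pvGroups rules).getD t []
      = rules.flatMap (fun Y => List.replicate ((pvTechsA Y).count t) Y) := by
  unfold pvGroups
  have key : ∀ (l : List (List (String × String)))
      (g : PySem.Dict String (List (List (String × String)))),
      (l.foldl pvGroupStep g).getD t []
        = g.getD t [] ++ l.flatMap (fun Y => List.replicate ((pvTechsA Y).count t) Y) := by
    intro l
    induction l with
    | nil => simp
    | cons Y l ih =>
      intro g
      rw [List.foldl_cons, ih, getD_pvGroupStep t ht g Y]
      simp
  simpa using key rules PySem.Dict.empty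

-- the dedup-append step is idempotent
lemma pvStep_idem (rid : String) (deps : PySem.Dict String (List String))
    (Y : List (String × String)) : pvStep rid (pvStep rid deps Y) Y = pvStep rid deps Y := by
  by_cases h : pvGet Y "rule_rule_id" ≠ "" ∧ pvGet Y "rule_rule_id" ≠ rid ∧
      pvGet Y "rule_rule_id" ∉ deps.getD rid []
  · have h1 : pvStep rid deps Y
        = deps.insert rid (deps.getD rid [] ++ [pvGet Y "rule_rule_id"]) := by
      unfold pvStep; rw [if_pos h]
    rw [h1]
    unfold pvStep
    rw [if_neg]
    rintro ⟨-, -, h3⟩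
    rw [PySem.Dict.getD_insert_self] at h3
    simp at h3
  · have h1 : pvStep rid deps Y = deps := by unfold pvStep; rw [if_neg h]
    rw [h1, h1]

lemma foldl_pvStep_const (rid : String) (deps : PySem.Dict String (List String))
    (Y : List (String × String)) (l : List (List (String × String)))
    (h : ∀ x ∈ l, x = Y) :
    l.foldl (pvStep rid) deps = if l = [] then deps else pvStep rid deps Y := by
  induction l generalizing deps with
  | nil => simp
  | cons x l ih =>
    have hx : x = Y := h x (by simp)
    subst hx
    rw [List.foldl_cons, if_neg (by simp),
      ih (pvStep rid deps x) (fun y hy => h y (by simp [hy]))]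
    by_cases hl : l = []
    · rw [if_pos hl]
    · rw [if_neg hl, pvStep_idem]

lemma pvParseTech_empty : pvParseTech "" = "" := by decide

-- A parses from the truthiness-filtered raw parts, B from all parts; for a nonempty
-- technique id the two membership tests agree (the empty part parses to "")
lemma mem_techsA_iff (t : String) (ht : t ≠ "") (Y : List (String × String)) :
    t ∈ pvTechsA Y ↔ t ∈ pvTechsB Y := by
  unfold pvTechsA pvTechsB
  constructor
  · intro hm
    rcases List.mem_map.1 hm with ⟨u, hu, hp⟩
    exact List.mem_map.2 ⟨u, List.mem_of_mem_filter hu, hp⟩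
  · intro hm
    rcases List.mem_map.1 hm with ⟨u, hu, hp⟩
    have hu0 : u ≠ "" := fun e => ht (by rw [e, pvParseTech_empty] at hp; exact hp.symm)
    exact List.mem_map.2 ⟨u, List.mem_filter.2 ⟨hu, by simpa using hu0⟩, hp⟩

lemma foldl_flatMap {a b s : Type} (l : List a) (f : a → List b) (g : s → b → s) (d : s) :
    (l.flatMap f).foldl g d = l.foldl (fun d x => (f x).foldl g d) d := by
  induction l generalizing d with
  | nil => rfl
  | cons x l ih => simp [List.flatMap_cons, List.foldl_append, ih]

-- A's scan of the pre-built group equals B's direct scan of the rule list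
lemma inner_eq (rules : List (List (String × String))) (rid t : String) (ht : t ≠ "")
    (deps : PySem.Dict String (List String)) :
    ((pvGroups rules).getD t []).foldl (pvStep rid) deps
      = rules.foldl (fun deps other =>
          if t ∉ pvTechsB other then deps else pvStep rid deps other) deps := by
  rw [getD_pvGroups rules t ht, foldl_flatMap]
  apply foldl_ext _ _ rules (fun d Y _ => ?_) deps
  rw [foldl_pvStep_const rid d Y _ (fun x hx => List.eq_of_mem_replicate hx)]
  by_cases hm : t ∈ pvTechsA Y
  · have hc : (pvTechsA Y).count t ≠ 0 := by
      simpa [Nat.pos_iff_ne_zero] using List.count_pos_iff.2 hm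
    rw [if_neg (by simp [hc]), if_neg (by simpa using (mem_techsA_iff t ht Y).1 hm)]
  · have hc : (pvTechsA Y).count t = 0 := List.count_eq_zero.2 hm
    rw [if_pos (by simp [hc]), if_pos (by simpa using fun h => hm ((mem_techsA_iff t ht Y).2 h))]

-- A's loop over the filtered-mapped technique list equals B's loop over the raw parts
lemma middle_eq (rules : List (List (String × String))) (rid : String)
    (parts : List String) (deps : PySem.Dict String (List String)) :
    (((parts.filter (fun t => t ≠ "")).map pvParseTech).foldl (fun deps tech =>
        if tech ≠ "" then ((pvGroups rules).getD tech []).foldl (pvStep rid) deps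
        else deps) deps)
      = parts.foldl (fun deps part =>
          if pvParseTech part = "" then deps
          else rules.foldl (fun deps other =>
            if pvParseTech part ∉ pvTechsB other then deps
            else pvStep rid deps other) deps) deps := by
  induction parts generalizing deps with
  | nil => rw [List.filter_nil, List.map_nil, List.foldl_nil, List.foldl_nil]
  | cons p parts ih =>
    by_cases hp : p = ""
    · subst hp
      rw [List.filter_cons_of_neg (by simp), List.foldl_cons, if_pos pvParseTech_empty, ih]
    · rw [List.filter_cons_of_pos (by simpa using hp), List.map_cons,
        List.foldl_cons, List.foldl_cons]
      by_cases hpt : pvParseTech p = ""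
      · rw [if_neg (by simpa using hpt), if_pos hpt, ih]
      · rw [if_pos (by simpa using hpt), if_neg hpt, inner_eq rules rid _ hpt, ih]

-- ===== VERDICT (by name: the statement is the Claim_ definition above) =====
theorem identify_dependencies_spec : Claim_equal_identify_dependencies := by
  intro rules _
  simp only [Spec_identify_dependencies, identify_dependencies, identify_dependencies_alt]
  refine congrArg PySem.Dict.items (foldl_ext _ _ rules (fun deps rule _ => ?_) PySem.Dict.empty)
  by_cases hr : pvGet rule "rule_rule_id" = ""
  · simp only [hr, if_pos]
  · simp only [hr, if_false]
    exact middle_eq rules (pvGet rule "rule_rule_id")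
      (pvSplit (pvGet rule "mitre_techniques") ", ") deps
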